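-- pv_equiv track=rewrite | github.com/g4ps/exercises | abstract_algebra/progs/ideal_check.py | get_ideal
-- ===== SOURCE A (Python) =====
-- def get_ideal(e, n):
--     ret = []
--     for i in range(n):
--         j = (i * e) % n
--         if (j not in ret):
--             ret.append(j)
--     ret.sort()
--     return ret
-- ===== SOURCE B (Python) =====
-- def get_ideal(e, n):
--     # Closed form: the ideal generated by e in Z/n is the set of multiples
--     # of gcd(e, n) below n, already in sorted order.
--     if n <= 0:
--         return []
--     a, b = abs(e), n
--     while b:
--         a, b = b, a % b
--     return list(range(0, n, a))
-- ===== Notes on version B (the rewrite author's own statement) =====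
-- stated objective: faster
-- what changed: Replaces the O(n^2) scan (n modular products with a linear membership test, then a sort) by the closed form: compute g = gcd(e, n) with Euclid's algorithm and return range(0, n, g), which is exactly the distinct sorted residues.
import Mathlib
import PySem

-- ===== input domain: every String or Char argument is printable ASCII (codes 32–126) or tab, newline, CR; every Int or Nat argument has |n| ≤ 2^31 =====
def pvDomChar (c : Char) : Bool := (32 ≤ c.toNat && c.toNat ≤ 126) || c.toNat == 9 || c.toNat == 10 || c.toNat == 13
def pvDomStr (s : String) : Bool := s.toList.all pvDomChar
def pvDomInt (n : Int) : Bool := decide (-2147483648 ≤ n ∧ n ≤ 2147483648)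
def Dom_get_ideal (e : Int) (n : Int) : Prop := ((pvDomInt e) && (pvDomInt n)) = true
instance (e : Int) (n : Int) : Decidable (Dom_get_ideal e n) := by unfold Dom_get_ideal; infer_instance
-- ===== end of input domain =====

-- B replaces A's quadratic scan-dedup-sort by the closed form range(0, n, gcd(e, n)) (faster).

-- ===== PORT A =====
-- for i in range(n): j = (i*e) % n; if j not in ret: ret.append(j); then ret.sort()
def get_ideal (e : Int) (n : Int) : List Int :=
  let ret : List Int :=
    (PySem.List.pyRange 0 n 1).foldl
      (fun ret i =>
        let j := PySem.Int.mod (i * e) n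
        if j ∈ ret then ret else ret ++ [j]) []
  PySem.List.sorted ret (fun x => x)

-- ===== PORT B =====
-- while b: a, b = b, a % b   (Euclid's loop on nonnegative ints; Nat.mod = Python % here)
def euclidLoop (a b : Nat) : Nat :=
  if b = 0 then a else euclidLoop b (a % b)
termination_by b
decreasing_by exact Nat.mod_lt a (Nat.pos_of_ne_zero (by omega))

def get_ideal_alt (e : Int) (n : Int) : List Int :=
  if n ≤ 0 then []
  else PySem.List.pyRange 0 n (euclidLoop e.natAbs n.toNat : Int)

-- ===== PRECONDITION & SPEC =====
def Spec_get_ideal (e : Int) (n : Int) (out : List Int) : Prop := out = get_ideal_alt e n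
instance (e : Int) (n : Int) (out : List Int) : Decidable (Spec_get_ideal e n out) := by unfold Spec_get_ideal; infer_instance

-- ===== CLAIM (what is proved, stated in full; the proofs are below) =====
def Claim_equal_get_ideal : Prop := ∀ (e : Int) (n : Int), Dom_get_ideal e n → Spec_get_ideal e n (get_ideal e n)

-- ===== LEMMAS AND PROOFS =====

-- Euclid's loop computes gcd
theorem euclidLoop_eq_gcd (a b : Nat) : euclidLoop a b = Nat.gcd b a := by
  induction b using Nat.strong_induction_on generalizing a with
  | _ b ih =>
    rw [euclidLoop]
    by_cases h : b = 0
    · simp [h]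
    · rw [if_neg h, ih (a % b) (Nat.mod_lt a (Nat.pos_of_ne_zero h)) b, ← Nat.gcd_rec]

-- A's dedup loop builds exactly set(map)
theorem ret_eq_ofList (e n : Int) :
    (PySem.List.pyRange 0 n 1).foldl
      (fun ret i =>
        let j := PySem.Int.mod (i * e) n
        if j ∈ ret then ret else ret ++ [j]) []
    = PySem.Set.ofList ((PySem.List.pyRange 0 n 1).map (fun i => PySem.Int.mod (i * e) n)) := by
  rw [PySem.Set.ofList_eq_foldl, List.foldl_map]
  congr 1
  funext s i
  simp [PySem.Set.add, PySem.Set.contains]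

-- the residues are exactly the multiples of gcd(n, e) in [0, n)
theorem mem_residues (e n : Int) (hn : 0 < n) (x : Int) :
    x ∈ (PySem.List.pyRange 0 n 1).map (fun i => PySem.Int.mod (i * e) n)
      ↔ 0 ≤ x ∧ x < n ∧ ((Int.gcd n e : Int)) ∣ x := by
  have hn0 : n ≠ 0 := by omega
  constructor
  · rintro hx
    rcases List.mem_map.mp hx with ⟨i, _, rfl⟩
    rw [PySem.Int.mod_eq_emod_of_pos hn]
    refine ⟨Int.emod_nonneg _ hn0, Int.emod_lt_of_pos _ hn, ?_⟩
    have hdn : ((Int.gcd n e : Int)) ∣ n := Int.gcd_dvd_left n e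
    have hde : ((Int.gcd n e : Int)) ∣ i * e := Dvd.dvd.mul_left (Int.gcd_dvd_right n e) i
    rw [Int.emod_def]
    exact dvd_sub hde (Dvd.dvd.mul_right hdn _)
  · rintro ⟨h0, h1, ⟨k, rfl⟩⟩
    set G : Int := (Int.gcd n e : Int) with hG
    set i0 : Int := Int.gcdB n e * k with hi0
    have hbez : G = n * Int.gcdA n e + e * Int.gcdB n e := Int.gcd_eq_gcd_ab n e
    have key : (i0 * e) % n = G * k := by
      have : i0 * e = G * k + n * (-(Int.gcdA n e * k)) := by
        rw [hi0, hbez]; ring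
      rw [this, Int.add_mul_emod_self_left, Int.emod_eq_of_lt h0 h1]
    refine List.mem_map.mpr ⟨i0 % n, ?_, ?_⟩
    · exact PySem.List.mem_pyRange_one.mpr ⟨Int.emod_nonneg _ hn0, Int.emod_lt_of_pos _ hn⟩
    · rw [PySem.Int.mod_eq_emod_of_pos hn]
      calc (i0 % n * e) % n = (i0 % n % n * (e % n)) % n := Int.mul_emod _ _ _
        _ = (i0 % n * (e % n)) % n := by rw [Int.emod_emod_of_dvd _ dvd_rfl]
        _ = (i0 * e) % n := (Int.mul_emod _ _ _).symm
        _ = G * k := key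

theorem pairwise_lt_pyRange_step (n g : Int) (hg : 0 < g) :
    (PySem.List.pyRange 0 n g).Pairwise (· < ·) := by
  rw [PySem.List.pyRange_of_pos 0 n hg]
  refine List.Pairwise.map _ ?_ (List.pairwise_lt_range)
  intro a b hab
  simpa using (mul_lt_mul_of_pos_left (by exact_mod_cast hab) hg)

-- ===== VERDICT (by name: the statement is the Claim_ definition above) =====
theorem get_ideal_spec : Claim_equal_get_ideal := by
  intro e n _
  unfold Spec_get_ideal get_ideal get_ideal_alt
  by_cases hn : n ≤ 0
  · simp only [hn, if_true]
    rw [PySem.List.pyRange_one_eq_nil hn]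
    exact (PySem.List.sorted_eq_nil_iff _ _ _).mpr rfl
  · rw [not_le] at hn
    simp only [not_le.mpr hn, if_false]
    rw [ret_eq_ofList]
    set g : Int := (euclidLoop e.natAbs n.toNat : Int) with hgdef
    have hg_eq : g = (Int.gcd n e : Int) := by
      rw [hgdef, euclidLoop_eq_gcd]
      have : n.toNat = n.natAbs := by omega
      rw [this]; rfl
    have hgpos : 0 < g := by
      rw [hg_eq]
      have : 0 < Int.gcd n e := Int.gcd_pos_of_ne_zero_left e (by omega)
      exact_mod_cast this
    have hpw := pairwise_lt_pyRange_step n g hgpos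
    refine PySem.List.sorted_eq_of_perm_of_pairwise_lt _ _ _ ?_ hpw
    refine (List.perm_ext_iff_of_nodup ?_ (PySem.Set.nodup_ofList _)).mpr ?_
    · exact hpw.imp ne_of_lt
    · intro x
      rw [PySem.Set.mem_ofList, mem_residues e n hn x,
        PySem.List.mem_pyRange_iff_of_pos hgpos, hg_eq, sub_zero]
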